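-- pv_equiv track=rewrite | github.com/maxuanquang/google-foobar | expanding-nebula-github.py | solution
-- ===== SOURCE A (Python) =====
-- from collections import defaultdict
--
-- def solution(g):
--     def combine(num1, num2, bitlen):
--         '''
--         Returns a number when apply rules (combine) on 2 numbers (2 rows)
--         '''
--         a = num1 & ~(1 << bitlen)
--         b = num2 & ~(1 << bitlen)
--         c = num1 >> 1
--         d = num2 >> 1
--         return (a & ~b & ~c & ~d) | (~a & b & ~c & ~d) | (~a & ~b & c & ~d) | (~a & ~b & ~c & d)
--
--     def q_combine(num1, num2, bitlen):
--         '''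
--         Returns a number when apply rules (combine) on 2 numbers (2 rows)
--
--         `q_combine` has the same functionality as `combine` but this is quangmx's implementation
--         because quangmx does not understand the function `combine` (but performance of `combine` is better than `q_combine`)
--         '''
--         ret = 0
--         for i in range(bitlen):
--             if getBit(num1, i) + getBit(num1, i + 1) + getBit(num2, i) + getBit(num2, i + 1) == 1:
--                 ret = setBit(ret, i)
--         return ret
--
--     def getBit(num, i):
--         return (num >> i) & 1
--
--     def setBit(num, i):
--         return num | (1 << i)
--
--     def build_map(ncols, nums):
--         '''
--         Return a dictionary which maps a number to its 2 numbers before combining (applying rules)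
--         '''
--         mapping = defaultdict(set)
--         _nums = set(nums)
--         for i in range(1 << (ncols + 1)):
--             for j in range(1 << (ncols + 1)):
--                 num = q_combine(i, j, ncols)
--                 if num in _nums:
--                     mapping[num].add((i, j))
--         return mapping
--
--     # Transpose grid for better performance because `width` is used for embedding rows, but `width` is large (3 <= width <= 50)
--     # while `height` is smaller (3 <= height <= 9)
--     g = list(zip(*g))
--
--     # Embed each row into a number
--     nums = [sum([1 << i if col else 0 for i, col in enumerate(row)])
--             for row in g]
--
--     # One number is formed by apply rules (combine) on two numbers
--     # mapping maps a number to its previous two numbers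
--     ncols = len(g[0])
--     mapping = build_map(ncols, nums)
--
--     # Calculate result
--     prev_count = {combination: 1 for combination in mapping[nums[0]]}
--     for row in nums[1:]:
--         curr_count = defaultdict(int)
--         for prev_combination in prev_count:
--             for curr_combination in mapping[row]:
--                 if prev_combination[1] == curr_combination[0]:
--                     curr_count[curr_combination] += prev_count[prev_combination]
--         prev_count = curr_count
--     ret = sum(prev_count.values())
--
--     return ret
-- ===== SOURCE B (Python) =====
-- def solution(g):
--     def q_combine(a, b, n):
--         ret = 0
--         for i in range(n):
--             if ((a >> i) & 1) + ((a >> (i + 1)) & 1) + ((b >> i) & 1) + ((b >> (i + 1)) & 1) == 1: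
--                 ret |= 1 << i
--         return ret
--
--     cols = list(zip(*g))
--     nums = [sum(1 << i if c else 0 for i, c in enumerate(col)) for col in cols]
--     n = len(cols[0])
--     size = 1 << (n + 1)
--     # dense DP over the state of the last (n+1)-bit column, instead of A's
--     # precomputed pair-set mapping and dict-of-pairs DP
--     cnt = [1] * size
--     for num in nums:
--         cnt = [sum(cnt[i] for i in range(size) if q_combine(i, j, n) == num) for j in range(size)]
--     return sum(cnt)
-- ===== Notes on version B (the rewrite author's own statement) =====
-- stated objective: simpler
-- what changed: B drops A's precomputed defaultdict(set) mapping of all (prev,curr) pair preimages and its dict-of-pairs DP with quadratic pair matching per row, and instead runs a dense DP over the single last-column state with a list of size 2^(n+1), recomputing the combine rule per transition.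
import Mathlib
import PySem

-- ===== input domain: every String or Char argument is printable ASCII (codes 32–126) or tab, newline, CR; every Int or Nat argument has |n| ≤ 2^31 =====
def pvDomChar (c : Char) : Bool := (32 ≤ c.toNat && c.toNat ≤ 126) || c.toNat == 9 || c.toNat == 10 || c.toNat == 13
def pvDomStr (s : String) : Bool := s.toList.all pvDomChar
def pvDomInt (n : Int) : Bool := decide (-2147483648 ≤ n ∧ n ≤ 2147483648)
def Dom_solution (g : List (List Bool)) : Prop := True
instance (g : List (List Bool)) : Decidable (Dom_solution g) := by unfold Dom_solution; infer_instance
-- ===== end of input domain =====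

-- B replaces A's precomputed pair-set mapping and dict-of-pairs DP by a short dense DP over the
-- state of the last (n+1)-bit column (objective: simpler). Both Pythons share the transpose,
-- row-embedding and combine rule, so those helpers are shared by the two ports below.

-- ===== PORT A =====
-- shared helper: `g = list(zip(*g))` (truncates to the shortest row, like zip)
def pyTranspose (g : List (List Bool)) : List (List Bool) :=
  (List.range (((g.map (fun r => r.length)).min?).getD 0)).map (fun c => g.map (fun r => r.getD c false))

-- shared helper: `sum([1 << i if col else 0 for i, col in enumerate(row)])`
def embedRow (row : List Bool) : Nat :=
  ((PySem.List.enumerate row).map (fun p => if p.2 then 2 ^ p.1.toNat else 0)).sum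

-- shared helpers: `(num >> i) & 1`, `num | (1 << i)`, and `q_combine` (the combine rule;
-- A's unused inner function `combine` is dead code and is not ported)
def getBit (num i : Nat) : Nat := (num >>> i) &&& 1
def setBit (num i : Nat) : Nat := num ||| 2 ^ i
def qCombine (num1 num2 : Nat) (bitlen : Nat) : Nat :=
  (List.range bitlen).foldl
    (fun ret i =>
      if getBit num1 i + getBit num1 (i + 1) + getBit num2 i + getBit num2 (i + 1) = 1 then
        setBit ret i
      else ret) 0

-- A's `build_map` (defaultdict(set) filled over all pairs i, j)
def buildMap (ncols : Nat) (nums : List Nat) : PySem.Dict Nat (PySem.Set (Nat × Nat)) :=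
  let snums := PySem.Set.ofList nums
  (List.range (2 ^ (ncols + 1))).foldl (fun mapping i =>
    (List.range (2 ^ (ncols + 1))).foldl (fun mapping j =>
      if PySem.Set.contains snums (qCombine i j ncols) then
        PySem.Dict.modify mapping (qCombine i j ncols) PySem.Set.empty
          (fun s => PySem.Set.add s (i, j))
      else mapping) mapping) PySem.Dict.empty

def solution (g : List (List Bool)) : Int :=
  let cols := pyTranspose g
  let nums := cols.map embedRow
  let ncols := (cols.headD []).length
  let mapping := buildMap ncols nums
  let prevCount : PySem.Dict (Nat × Nat) Int :=
    (PySem.Dict.getD mapping (nums.headD 0) PySem.Set.empty).foldl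
      (fun d comb => d.insert comb 1) PySem.Dict.empty
  let finalCount := (nums.drop 1).foldl (fun prevCount row =>
    prevCount.items.foldl (fun currCount pq =>
      (PySem.Dict.getD mapping row PySem.Set.empty).foldl (fun currCount cc =>
        if pq.1.2 == cc.1 then PySem.Dict.modify currCount cc 0 (fun v => v + pq.2)
        else currCount) currCount) PySem.Dict.empty) prevCount
  (PySem.Dict.values finalCount).sum

-- ===== PORT B =====
def solution_alt (g : List (List Bool)) : Int :=
  let cols := pyTranspose g
  let nums := cols.map embedRow
  let n := (cols.headD []).length
  let size := 2 ^ (n + 1)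
  let finalCnt := nums.foldl (fun cnt num =>
    (List.range size).map (fun j =>
      (((List.range size).filter (fun i => qCombine i j n == num)).map
        (fun i => cnt.getD i 0)).sum)) (List.replicate size (1 : Int))
  finalCnt.sum

-- ===== PRECONDITION & SPEC =====
-- Pre_ excludes exactly the inputs on which Python A raises IndexError (`g[0]` after the
-- transpose): the empty grid and grids containing an empty row; B raises there too.
def Pre_solution (g : List (List Bool)) : Prop := g ≠ [] ∧ ∀ r ∈ g, r ≠ []
instance (g : List (List Bool)) : Decidable (Pre_solution g) := by unfold Pre_solution; infer_instance

def pvWitness_solution : List (List Bool) := [[true, false], [false, true], [true, true]]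

def Spec_solution (g : List (List Bool)) (out : Int) : Prop := out = solution_alt g
instance (g : List (List Bool)) (out : Int) : Decidable (Spec_solution g out) := by unfold Spec_solution; infer_instance

-- ===== CLAIM (what is proved, stated in full; the proofs are below) =====
def Claim_equal_solution : Prop := ∀ (g : List (List Bool)), Dom_solution g → Pre_solution g → Spec_solution g (solution g)

-- ===== LEMMAS AND PROOFS =====

-- the state space and the list of all pairs of states enumerated by A's build_map
def pvS (n : Nat) : Nat := 2 ^ (n + 1)
def pvL (n : Nat) : List (Nat × Nat) :=
  (List.range (pvS n)).flatMap (fun i => (List.range (pvS n)).map (fun j => (i, j)))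

-- "sum of the values of all items whose key has second component j"
def pvGsum (items : List ((Nat × Nat) × Int)) (j : Nat) : Int :=
  ((items.filter (fun p => p.1.2 == j)).map (fun p => p.2)).sum

-- one abstract DP step shared by both correspondences
def pvStepF (n : Nat) (f : Nat → Int) (num : Nat) : Nat → Int :=
  fun j => (((List.range (pvS n)).filter (fun i => qCombine i j n == num)).map f).sum

def pvOnes : Nat → Int := fun _ => 1

lemma pvL_eq_product (n : Nat) : pvL n = (List.range (pvS n)) ×ˢ (List.range (pvS n)) := rfl

lemma nodup_pvL (n : Nat) : (pvL n).Nodup := by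
  rw [pvL_eq_product]
  exact List.Nodup.product (List.nodup_range) (List.nodup_range)

lemma mem_pvL (n : Nat) (p : Nat × Nat) : p ∈ pvL n ↔ p.1 < pvS n ∧ p.2 < pvS n := by
  rw [pvL_eq_product]
  cases p with
  | mk a b => simp

lemma pv_filter_flatMap {α β : Type} (l : List α) (f : α → List β) (p : β → Bool) :
    (l.flatMap f).filter p = l.flatMap (fun x => (f x).filter p) := by
  induction l with
  | nil => simp
  | cons x t ih => simp [List.flatMap_cons, List.filter_append, ih]

lemma range_filter_beq (S j : Nat) :
    (List.range S).filter (fun x => x == j) = if j < S then [j] else [] := by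
  by_cases h : j < S
  · rw [List.filter_beq, List.count_eq_one_of_mem List.nodup_range (by simpa using h)]
    simp [h]
  · rw [List.filter_beq, List.count_eq_zero_of_not_mem (by simpa using h)]
    simp [h]

lemma getD_fold_setadd (l : List (Nat × Nat)) (key : Nat × Nat → Nat) (pr : Nat × Nat → Bool)
    (d : PySem.Dict Nat (PySem.Set (Nat × Nat))) (v : Nat) :
    (l.foldl (fun m p =>
        if pr p then PySem.Dict.modify m (key p) PySem.Set.empty (fun s => PySem.Set.add s p)
        else m) d).getD v PySem.Set.empty
    = (l.filter (fun p => pr p && (key p == v))).foldl (fun s p => PySem.Set.add s p)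
        (d.getD v PySem.Set.empty) := by
  induction l generalizing d with
  | nil => simp
  | cons p t ih =>
    simp only [List.foldl_cons, List.filter_cons]
    by_cases hp : pr p
    · by_cases hk : key p = v
      · subst hk
        have h1 : (pr p && (key p == key p)) = true := by simp [hp]
        rw [if_pos hp, ih, PySem.Dict.getD_modify, if_pos rfl, if_pos h1, List.foldl_cons]
      · rw [if_pos hp, ih, PySem.Dict.getD_modify, if_neg (fun h => hk h.symm),
          if_neg (by simp [hp, hk])]
    · simp only [Bool.not_eq_true] at hp
      rw [if_neg (by simp [hp]), ih, if_neg (by simp [hp])]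

lemma foldl_setadd_of_nodup (l : List (Nat × Nat)) (s : PySem.Set (Nat × Nat))
    (h : l.Nodup) (h2 : ∀ x ∈ l, x ∉ s) :
    l.foldl (fun s p => PySem.Set.add s p) s = s ++ l := by
  induction l generalizing s with
  | nil => simp
  | cons x t ih =>
    simp only [List.foldl_cons]
    have hx : PySem.Set.add s x = s ++ [x] := by
      have hxs : x ∉ s := h2 x (List.mem_cons_self)
      simp [PySem.Set.add, PySem.Set.contains, hxs]
    rw [hx, ih (s ++ [x]) (List.Nodup.of_cons h) ?_]
    · simp
    · intro y hy
      simp only [List.mem_append, List.mem_singleton, not_or]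
      exact ⟨h2 y (List.mem_cons_of_mem _ hy), fun he => (List.nodup_cons.mp h).1 (he ▸ hy)⟩

lemma foldl_pairs {gam : Type} (A B : Nat) (F : gam → (Nat × Nat) → gam) (init : gam) :
    ((List.range A).flatMap (fun i => (List.range B).map (fun j => (i, j)))).foldl F init
    = (List.range A).foldl (fun acc i => (List.range B).foldl (fun acc j => F acc (i, j)) acc) init := by
  rw [List.foldl_flatMap]
  simp only [List.foldl_map]

lemma pv_flatMap_singleton {alp bet : Type} (l : List alp) (f : alp → bet) :
    l.flatMap (fun x => [f x]) = l.map f := by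
  induction l with
  | nil => rfl
  | cons x t ih => simp [List.flatMap_cons, ih]

-- A's mapping at a key that occurs in nums is exactly the filtered list of all pairs
lemma mrow_eq (n : Nat) (nums : List Nat) (num : Nat) (hnum : num ∈ nums) :
    PySem.Dict.getD (buildMap n nums) num PySem.Set.empty
    = (pvL n).filter (fun p => qCombine p.1 p.2 n == num) := by
  have hbm : buildMap n nums
      = (pvL n).foldl (fun m p =>
          if PySem.Set.contains (PySem.Set.ofList nums) (qCombine p.1 p.2 n) then
            PySem.Dict.modify m (qCombine p.1 p.2 n) PySem.Set.empty
              (fun s => PySem.Set.add s p)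
          else m) PySem.Dict.empty := by
    rw [show pvL n = (List.range (pvS n)).flatMap
        (fun i => (List.range (pvS n)).map (fun j => (i, j))) from rfl, foldl_pairs]
    rfl
  rw [hbm, getD_fold_setadd (key := fun p => qCombine p.1 p.2 n)
    (pr := fun p => PySem.Set.contains (PySem.Set.ofList nums) (qCombine p.1 p.2 n))]
  have hfc : (pvL n).filter
        (fun p => PySem.Set.contains (PySem.Set.ofList nums) (qCombine p.1 p.2 n)
          && (qCombine p.1 p.2 n == num))
      = (pvL n).filter (fun p => qCombine p.1 p.2 n == num) := by
    apply List.filter_congr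
    intro p _
    by_cases hq : qCombine p.1 p.2 n = num
    · simp [hq, hnum]
    · simp [hq]
  rw [hfc, PySem.Dict.getD_empty,
    foldl_setadd_of_nodup _ _ (List.Nodup.filter _ (nodup_pvL n)) (by simp [PySem.Set.empty])]
  simp [PySem.Set.empty]

lemma filter_snd_pvL (n : Nat) (j : Nat) :
    (pvL n).filter (fun p => p.2 == j)
    = if j < pvS n then (List.range (pvS n)).map (fun i => (i, j)) else [] := by
  unfold pvL
  rw [pv_filter_flatMap]
  have hin : ∀ i : Nat, ((List.range (pvS n)).map (fun j' => (i, j'))).filter (fun p => p.2 == j)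
      = ((List.range (pvS n)).filter (fun x => x == j)).map (fun j' => (i, j')) := by
    intro i
    rw [List.filter_map]
    rfl
  simp only [hin, range_filter_beq]
  by_cases h : j < pvS n
  · simp only [if_pos h]
    exact pv_flatMap_singleton _ _
  · simp only [if_neg h]
    simp

lemma mrow_slice (n : Nat) (num j : Nat) :
    ((pvL n).filter (fun p => qCombine p.1 p.2 n == num)).filter (fun p => p.2 == j)
    = if j < pvS n then
        ((List.range (pvS n)).filter (fun i => qCombine i j n == num)).map (fun i => (i, j))
      else [] := by
  rw [List.filter_filter]
  have hsw : (pvL n).filter (fun a => (a.2 == j) && (qCombine a.1 a.2 n == num))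
      = ((pvL n).filter (fun p => p.2 == j)).filter (fun p => qCombine p.1 p.2 n == num) := by
    rw [List.filter_filter]
    apply List.filter_congr
    intro p _
    exact Bool.and_comm _ _
  rw [hsw, filter_snd_pvL]
  by_cases h : j < pvS n
  · simp only [if_pos h]
    rw [List.filter_map]
    rfl
  · simp only [if_neg h]
    simp

lemma getD_fold_modadd (l : List (Nat × Nat)) (a : Int) (d : PySem.Dict (Nat × Nat) Int)
    (c : Nat × Nat) :
    (l.foldl (fun d x => PySem.Dict.modify d x 0 (fun v => v + a)) d).getD c 0
    = d.getD c 0 + a * l.count c := by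
  induction l generalizing d with
  | nil => simp
  | cons x t ih =>
    simp only [List.foldl_cons]
    rw [ih, PySem.Dict.getD_modify]
    by_cases hx : c = x
    · subst hx
      rw [if_pos rfl, List.count_cons, if_pos (by simp)]
      push_cast
      ring
    · rw [if_neg hx, List.count_cons, if_neg (by simp; exact fun h => hx h.symm)]
      simp

-- the inner loop of A's DP step
lemma inner_getD (mr : List (Nat × Nat)) (hm : mr.Nodup) (pq : (Nat × Nat) × Int)
    (curr : PySem.Dict (Nat × Nat) Int) (c : Nat × Nat) :
    (mr.foldl (fun currCount cc =>
        if pq.1.2 == cc.1 then PySem.Dict.modify currCount cc 0 (fun v => v + pq.2)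
        else currCount) curr).getD c 0
    = curr.getD c 0 + (if pq.1.2 = c.1 ∧ c ∈ mr then pq.2 else 0) := by
  rw [PySem.List.foldl_if_eq_foldl_filter, getD_fold_modadd]
  congr 1
  by_cases h1 : pq.1.2 = c.1
  · by_cases h2 : c ∈ mr
    · rw [if_pos ⟨h1, h2⟩]
      have hcnt : (mr.filter (fun cc => pq.1.2 == cc.1)).count c = 1 := by
        apply List.count_eq_one_of_mem (List.Nodup.filter _ hm)
        simp [List.mem_filter, h2, h1]
      rw [hcnt]
      ring
    · rw [if_neg (by tauto)]
      have hcnt : (mr.filter (fun cc => pq.1.2 == cc.1)).count c = 0 := by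
        apply List.count_eq_zero_of_not_mem
        simp only [List.mem_filter]
        tauto
      rw [hcnt]
      ring
  · rw [if_neg (by tauto)]
    have hcnt : (mr.filter (fun cc => pq.1.2 == cc.1)).count c = 0 := by
      apply List.count_eq_zero_of_not_mem
      simp only [List.mem_filter, beq_iff_eq]
      tauto
    rw [hcnt]
    ring

lemma inner_keys (mr : List (Nat × Nat)) (pq : (Nat × Nat) × Int)
    (curr : PySem.Dict (Nat × Nat) Int) (k : Nat × Nat) :
    (k ∈ (mr.foldl (fun currCount cc =>
        if pq.1.2 == cc.1 then PySem.Dict.modify currCount cc 0 (fun v => v + pq.2)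
        else currCount) curr).keys)
    ↔ (k ∈ curr.keys ∨ (k ∈ mr ∧ pq.1.2 = k.1)) := by
  rw [PySem.List.foldl_if_eq_foldl_filter]
  rw [PySem.Dict.keys_foldl_modify_key (key := fun cc => cc)]
  rw [show ((mr.filter (fun cc => pq.1.2 == cc.1)).map (fun cc => cc))
      = mr.filter (fun cc => pq.1.2 == cc.1) from List.map_id' _]
  unfold PySem.Set.update
  rw [PySem.Set.mem_foldl_add (f := fun b => b)]
  simp only [List.mem_filter, beq_iff_eq]
  constructor
  · rintro (h | ⟨b, ⟨hb1, hb2⟩, rfl⟩)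
    · exact Or.inl h
    · exact Or.inr ⟨hb1, hb2⟩
  · rintro (h | ⟨h1, h2⟩)
    · exact Or.inl h
    · exact Or.inr ⟨k, ⟨h1, h2⟩, rfl⟩

lemma inner_nodup_keys (mr : List (Nat × Nat)) (pq : (Nat × Nat) × Int)
    (curr : PySem.Dict (Nat × Nat) Int) (h : curr.keys.Nodup) :
    (mr.foldl (fun currCount cc =>
        if pq.1.2 == cc.1 then PySem.Dict.modify currCount cc 0 (fun v => v + pq.2)
        else currCount) curr).keys.Nodup := by
  rw [PySem.List.foldl_if_eq_foldl_filter]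
  exact PySem.Dict.nodup_keys_foldl_modify_key _ (fun cc => cc) 0 (fun _ _ => fun v => v + pq.2) _ h

lemma outer_keys (mr : List (Nat × Nat)) (ps : List ((Nat × Nat) × Int))
    (c0 : PySem.Dict (Nat × Nat) Int) (k : Nat × Nat) :
    (k ∈ (ps.foldl (fun currCount pq =>
        mr.foldl (fun currCount cc =>
          if pq.1.2 == cc.1 then PySem.Dict.modify currCount cc 0 (fun v => v + pq.2)
          else currCount) currCount) c0).keys)
    ↔ (k ∈ c0.keys ∨ (k ∈ mr ∧ ∃ pq ∈ ps, pq.1.2 = k.1)) := by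
  induction ps generalizing c0 with
  | nil => simp
  | cons pq t ih =>
    simp only [List.foldl_cons]
    rw [ih, inner_keys]
    simp only [List.mem_cons]
    constructor
    · rintro ((h | ⟨h1, h2⟩) | ⟨h1, q, hq, h2⟩)
      · exact Or.inl h
      · exact Or.inr ⟨h1, pq, Or.inl rfl, h2⟩
      · exact Or.inr ⟨h1, q, Or.inr hq, h2⟩
    · rintro (h | ⟨h1, q, (rfl | hq), h2⟩)
      · exact Or.inl (Or.inl h)
      · exact Or.inl (Or.inr ⟨h1, h2⟩)
      · exact Or.inr ⟨h1, q, hq, h2⟩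

lemma outer_nodup_keys (mr : List (Nat × Nat)) (ps : List ((Nat × Nat) × Int))
    (c0 : PySem.Dict (Nat × Nat) Int) (h : c0.keys.Nodup) :
    (ps.foldl (fun currCount pq =>
        mr.foldl (fun currCount cc =>
          if pq.1.2 == cc.1 then PySem.Dict.modify currCount cc 0 (fun v => v + pq.2)
          else currCount) currCount) c0).keys.Nodup := by
  induction ps generalizing c0 with
  | nil => exact h
  | cons pq t ih =>
    simp only [List.foldl_cons]
    exact ih _ (inner_nodup_keys mr pq c0 h)

lemma outer_getD (mr : List (Nat × Nat)) (hm : mr.Nodup) (ps : List ((Nat × Nat) × Int))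
    (c0 : PySem.Dict (Nat × Nat) Int) (c : Nat × Nat) :
    (ps.foldl (fun currCount pq =>
        mr.foldl (fun currCount cc =>
          if pq.1.2 == cc.1 then PySem.Dict.modify currCount cc 0 (fun v => v + pq.2)
          else currCount) currCount) c0).getD c 0
    = c0.getD c 0
      + (if c ∈ mr then ((ps.filter (fun pq => pq.1.2 == c.1)).map (fun pq => pq.2)).sum else 0) := by
  induction ps generalizing c0 with
  | nil => simp
  | cons pq t ih =>
    simp only [List.foldl_cons]
    rw [ih, inner_getD mr hm pq c0 c]
    by_cases hc : c ∈ mr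
    · simp only [if_pos hc, List.filter_cons]
      by_cases hpq : pq.1.2 = c.1
      · rw [if_pos ⟨hpq, hc⟩, if_pos (by simp [hpq])]
        simp only [List.map_cons, List.sum_cons]
        ring
      · rw [if_neg (by tauto), if_neg (by simp [hpq])]
        ring
    · simp only [if_neg hc]
      rw [if_neg (by tauto)]
      ring

-- grouped sums after one DP step
lemma step_gsum (mr : List (Nat × Nat)) (hm : mr.Nodup) (ps : List ((Nat × Nat) × Int)) (j : Nat) :
    pvGsum (ps.foldl (fun currCount pq =>
        mr.foldl (fun currCount cc =>
          if pq.1.2 == cc.1 then PySem.Dict.modify currCount cc 0 (fun v => v + pq.2)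
          else currCount) currCount) PySem.Dict.empty).items j
    = ((mr.filter (fun cc => cc.2 == j)).map (fun cc => pvGsum ps cc.1)).sum := by
  set D := ps.foldl (fun currCount pq =>
      mr.foldl (fun currCount cc =>
        if pq.1.2 == cc.1 then PySem.Dict.modify currCount cc 0 (fun v => v + pq.2)
        else currCount) currCount) (PySem.Dict.empty : PySem.Dict (Nat × Nat) Int) with hD
  have hKnd : D.keys.Nodup := by
    rw [hD]
    exact outer_nodup_keys mr ps _ PySem.Dict.nodup_keys_empty
  have hKmem : ∀ k, k ∈ D.keys ↔ (k ∈ mr ∧ ∃ pq ∈ ps, pq.1.2 = k.1) := by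
    intro k
    rw [hD, outer_keys]
    simp [PySem.Dict.keys_empty]
  have hgetD : ∀ k ∈ D.keys, D.getD k 0 = pvGsum ps k.1 := by
    intro k hk
    rw [hD, outer_getD mr hm, PySem.Dict.getD_empty, if_pos ((hKmem k).mp (hD ▸ hk)).1]
    unfold pvGsum
    simp
  have hitems : D.items = D.keys.map (fun k => (k, D.getD k 0)) :=
    PySem.Dict.items_eq_map_keys D hKnd 0
  unfold pvGsum
  rw [hitems, List.filter_map]
  rw [show ((fun p : (Nat × Nat) × Int => p.1.2 == j) ∘ (fun k : Nat × Nat => (k, D.getD k 0)))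
        = (fun k : Nat × Nat => k.2 == j) from rfl]
  rw [List.map_map]
  rw [show ((fun p : (Nat × Nat) × Int => p.2) ∘ (fun k : Nat × Nat => (k, D.getD k 0)))
        = (fun k : Nat × Nat => D.getD k 0) from rfl]
  rw [List.map_congr_left (fun k hk => hgetD k (List.mem_of_mem_filter hk))]
  have h1 : (D.keys.filter (fun k => k.2 == j)).Nodup := List.Nodup.filter _ hKnd
  have h2 : (mr.filter (fun cc => cc.2 == j)).Nodup := List.Nodup.filter _ hm
  rw [← List.sum_toFinset _ h1, ← List.sum_toFinset _ h2]
  apply Finset.sum_subset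
  · intro x hx
    rw [List.mem_toFinset, List.mem_filter] at hx ⊢
    exact ⟨((hKmem x).mp hx.1).1, hx.2⟩
  · intro x hx hnx
    rw [List.mem_toFinset, List.mem_filter] at hx hnx
    have hxK : x ∉ D.keys := fun h => hnx ⟨h, hx.2⟩
    have hnex : ¬ ∃ pq ∈ ps, pq.1.2 = x.1 := fun h => hxK ((hKmem x).mpr ⟨hx.1, h⟩)
    unfold pvGsum
    rw [show ps.filter (fun p => p.1.2 == x.1) = [] from
      List.filter_eq_nil_iff.mpr
        (fun q hq => by simp only [beq_iff_eq]; exact fun he => hnex ⟨q, hq, he⟩)]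
    simp

lemma pvGsum_cons (p : (Nat × Nat) × Int) (t : List ((Nat × Nat) × Int)) (j : Nat) :
    pvGsum (p :: t) j = (if p.1.2 = j then p.2 else 0) + pvGsum t j := by
  by_cases h : p.1.2 = j <;> simp [pvGsum, h]

lemma sum_map_range_ite (S a : Nat) (b : Int) (ha : a < S) :
    ((List.range S).map (fun j => if a = j then b else 0)).sum = b := by
  rw [← List.sum_toFinset _ List.nodup_range, List.toFinset_range]
  simp [Finset.sum_ite_eq, ha]

-- total of all values = sum of grouped sums over the state range
lemma sum_values_eq (S : Nat) (items : List ((Nat × Nat) × Int))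
    (hb : ∀ p ∈ items, p.1.2 < S) :
    (items.map (fun p => p.2)).sum = ((List.range S).map (fun j => pvGsum items j)).sum := by
  induction items with
  | nil => simp [pvGsum]
  | cons p t ih =>
    simp only [List.map_cons, List.sum_cons]
    have hsplit : (List.range S).map (fun j => pvGsum (p :: t) j)
        = (List.range S).map (fun j => (if p.1.2 = j then p.2 else 0) + pvGsum t j) :=
      List.map_congr_left (fun j _ => pvGsum_cons p t j)
    rw [hsplit]
    have hadd : ((List.range S).map (fun j => (if p.1.2 = j then p.2 else 0) + pvGsum t j)).sum
        = ((List.range S).map (fun j => if p.1.2 = j then p.2 else 0)).sum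
          + ((List.range S).map (fun j => pvGsum t j)).sum := by
      induction (List.range S) with
      | nil => simp
      | cons x l ihl => simp only [List.map_cons, List.sum_cons, ihl]; ring
    rw [hadd, sum_map_range_ite S p.1.2 p.2 (hb p List.mem_cons_self),
      ih (fun q hq => hb q (List.mem_cons_of_mem _ hq))]

-- the initial dict {comb : 1} of A
lemma init_items_gen (mr : List (Nat × Nat)) (d : PySem.Dict (Nat × Nat) Int) (hm : mr.Nodup)
    (hf : ∀ x ∈ mr, d.contains x = false) :
    (mr.foldl (fun d comb => d.insert comb 1) d).items
    = d.items ++ mr.map (fun p => (p, (1 : Int))) := by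
  induction mr generalizing d with
  | nil => simp
  | cons x t ih =>
    simp only [List.foldl_cons, List.map_cons]
    rw [ih (d.insert x 1) (List.Nodup.of_cons hm) ?_]
    · rw [PySem.Dict.items_insert_of_not_contains d 1 (hf x List.mem_cons_self)]
      simp
    · intro y hy
      rw [PySem.Dict.contains_insert]
      have hyx : y ≠ x := fun he => (List.nodup_cons.mp hm).1 (he ▸ hy)
      simp [hyx, hf y (List.mem_cons_of_mem _ hy)]

lemma init_items (mr : List (Nat × Nat)) (hm : mr.Nodup) :
    (mr.foldl (fun d comb => d.insert comb 1) (PySem.Dict.empty : PySem.Dict (Nat × Nat) Int)).items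
    = mr.map (fun p => (p, (1 : Int))) := by
  rw [init_items_gen mr _ hm (fun x _ => PySem.Dict.contains_empty x)]
  simp [show (PySem.Dict.empty : PySem.Dict (Nat × Nat) Int).items = [] from rfl]

-- A's row loop preserves the correspondence with the abstract DP
lemma A_loop (n : Nat) (nums : List Nat) (rs : List Nat) (hrs : ∀ r ∈ rs, r ∈ nums)
    (prev : PySem.Dict (Nat × Nat) Int) (f : Nat → Int)
    (hb : ∀ p ∈ prev.items, p.1.2 < pvS n)
    (hinv : ∀ j, pvGsum prev.items j = if j < pvS n then f j else 0) :
    (∀ p ∈ (rs.foldl (fun prevCount row =>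
      prevCount.items.foldl (fun currCount pq =>
        (PySem.Dict.getD (buildMap n nums) row PySem.Set.empty).foldl (fun currCount cc =>
          if pq.1.2 == cc.1 then PySem.Dict.modify currCount cc 0 (fun v => v + pq.2)
          else currCount) currCount) PySem.Dict.empty) prev).items, p.1.2 < pvS n)
    ∧ ∀ j, pvGsum (rs.foldl (fun prevCount row =>
      prevCount.items.foldl (fun currCount pq =>
        (PySem.Dict.getD (buildMap n nums) row PySem.Set.empty).foldl (fun currCount cc =>
          if pq.1.2 == cc.1 then PySem.Dict.modify currCount cc 0 (fun v => v + pq.2)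
          else currCount) currCount) PySem.Dict.empty) prev).items j
      = if j < pvS n then (rs.foldl (pvStepF n) f) j else 0 := by
  induction rs generalizing prev f with
  | nil => exact ⟨hb, hinv⟩
  | cons row t ih =>
    simp only [List.foldl_cons]
    have hrow : row ∈ nums := hrs row List.mem_cons_self
    have hmr : PySem.Dict.getD (buildMap n nums) row PySem.Set.empty
        = (pvL n).filter (fun p => qCombine p.1 p.2 n == row) := mrow_eq n nums row hrow
    have hmrnd : (PySem.Dict.getD (buildMap n nums) row PySem.Set.empty).Nodup := by
      rw [hmr]; exact List.Nodup.filter _ (nodup_pvL n)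
    set prev' := prev.items.foldl (fun currCount pq =>
        (PySem.Dict.getD (buildMap n nums) row PySem.Set.empty).foldl (fun currCount cc =>
          if pq.1.2 == cc.1 then PySem.Dict.modify currCount cc 0 (fun v => v + pq.2)
          else currCount) currCount) PySem.Dict.empty with hprev'
    have hb' : ∀ p ∈ prev'.items, p.1.2 < pvS n := by
      intro p hp
      have hk : p.1 ∈ prev'.keys := PySem.Dict.mem_keys_of_mem_items prev' hp
      rw [hprev', outer_keys] at hk
      rcases hk with h | ⟨h1, _⟩
      · simp [PySem.Dict.keys_empty] at h
      · rw [hmr, List.mem_filter] at h1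
        exact ((mem_pvL n p.1).mp h1.1).2
    have hinv' : ∀ j, pvGsum prev'.items j = if j < pvS n then pvStepF n f row j else 0 := by
      intro j
      rw [hprev', step_gsum _ hmrnd]
      have hcong : ((PySem.Dict.getD (buildMap n nums) row PySem.Set.empty).filter
            (fun cc => cc.2 == j)).map (fun cc => pvGsum prev.items cc.1)
          = ((PySem.Dict.getD (buildMap n nums) row PySem.Set.empty).filter
            (fun cc => cc.2 == j)).map (fun cc => f cc.1) := by
        apply List.map_congr_left
        intro cc hcc
        have hccm : cc ∈ (pvL n) := by
          have h1 := List.mem_of_mem_filter hcc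
          rw [hmr] at h1
          exact List.mem_of_mem_filter h1
        rw [hinv cc.1, if_pos ((mem_pvL n cc).mp hccm).1]
      rw [hcong, hmr, mrow_slice]
      by_cases h : j < pvS n
      · simp only [if_pos h]
        rw [List.map_map]
        rfl
      · simp only [if_neg h]
        simp
    exact ih (fun r hr => hrs r (List.mem_cons_of_mem _ hr)) prev' (pvStepF n f row) hb' hinv'

lemma getD_map_range (S : Nat) (f : Nat → Int) (i : Nat) (h : i < S) :
    ((List.range S).map f).getD i 0 = f i := by
  simp [List.getD_eq_getElem?_getD, h]

-- B's row loop tracks the abstract DP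
lemma B_loop (n : Nat) (ms : List Nat) (f : Nat → Int) :
    ms.foldl (fun cnt num =>
      (List.range (pvS n)).map (fun j =>
        (((List.range (pvS n)).filter (fun i => qCombine i j n == num)).map
          (fun i => cnt.getD i 0)).sum)) ((List.range (pvS n)).map f)
    = (List.range (pvS n)).map (ms.foldl (pvStepF n) f) := by
  induction ms generalizing f with
  | nil => rfl
  | cons m t ih =>
    simp only [List.foldl_cons]
    have hstep : (List.range (pvS n)).map (fun j =>
          (((List.range (pvS n)).filter (fun i => qCombine i j n == m)).map
            (fun i => (((List.range (pvS n)).map f).getD i 0))).sum)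
        = (List.range (pvS n)).map (pvStepF n f m) := by
      apply List.map_congr_left
      intro j _
      unfold pvStepF
      congr 1
      apply List.map_congr_left
      intro i hi
      exact getD_map_range _ f i (List.mem_range.mp (List.mem_of_mem_filter hi))
    rw [hstep, ih]

-- ===== VERDICT (by name: the statement is the Claim_ definition above) =====
theorem solution_spec : Claim_equal_solution := by
  unfold Claim_equal_solution
  intro g _ hpre
  unfold Spec_solution
  obtain ⟨hg, hrows⟩ := hpre
  have hmin : ∃ v, (g.map (fun r => r.length)).min? = some v ∧ 1 ≤ v := by
    cases hm : (g.map (fun r => r.length)).min? with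
    | none =>
      rw [List.min?_eq_none_iff] at hm
      exact absurd (List.map_eq_nil_iff.mp hm) hg
    | some v =>
      refine ⟨v, rfl, ?_⟩
      have hv : v ∈ g.map (fun r => r.length) := List.min?_mem hm
      obtain ⟨r, hr, hrl⟩ := List.mem_map.mp hv
      have hrne : r ≠ [] := hrows r hr
      have hpos : 0 < r.length := List.length_pos_iff.mpr hrne
      omega
  obtain ⟨v, hv, hv1⟩ := hmin
  have hcols : pyTranspose g ≠ [] := by
    unfold pyTranspose
    rw [hv]
    simp only [Option.getD_some]
    intro h
    rw [List.map_eq_nil_iff, List.range_eq_nil] at h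
    omega
  set cols := pyTranspose g with hcolsdef
  set nums := cols.map embedRow with hnumsdef
  set n := (cols.headD []).length with hn
  have hnumsne : nums ≠ [] := by
    rw [hnumsdef]
    exact fun h => hcols (List.map_eq_nil_iff.mp h)
  obtain ⟨n0, ntail, hcons⟩ : ∃ n0 ntail, nums = n0 :: ntail := by
    cases hnm : nums with
    | nil => exact absurd hnm hnumsne
    | cons a b => exact ⟨a, b, rfl⟩
  -- characterise A's initial dict
  have hn0mem : nums.headD 0 ∈ nums := by rw [hcons]; exact List.mem_cons_self
  have hmr0 : PySem.Dict.getD (buildMap n nums) (nums.headD 0) PySem.Set.empty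
      = (pvL n).filter (fun p => qCombine p.1 p.2 n == nums.headD 0) :=
    mrow_eq n nums (nums.headD 0) hn0mem
  have hmr0nd : (PySem.Dict.getD (buildMap n nums) (nums.headD 0) PySem.Set.empty).Nodup := by
    rw [hmr0]; exact List.Nodup.filter _ (nodup_pvL n)
  have hinit : ((PySem.Dict.getD (buildMap n nums) (nums.headD 0) PySem.Set.empty).foldl
      (fun d comb => d.insert comb 1) (PySem.Dict.empty : PySem.Dict (Nat × Nat) Int)).items
      = (PySem.Dict.getD (buildMap n nums) (nums.headD 0) PySem.Set.empty).map
          (fun p => (p, (1 : Int))) :=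
    init_items _ hmr0nd
  have hb0 : ∀ p ∈ ((PySem.Dict.getD (buildMap n nums) (nums.headD 0) PySem.Set.empty).foldl
      (fun d comb => d.insert comb 1) (PySem.Dict.empty : PySem.Dict (Nat × Nat) Int)).items,
      p.1.2 < pvS n := by
    intro p hp
    rw [hinit] at hp
    obtain ⟨q, hq, hqe⟩ := List.mem_map.mp hp
    rw [hmr0, List.mem_filter] at hq
    rw [← hqe]
    exact ((mem_pvL n q).mp hq.1).2
  have hinv0 : ∀ j, pvGsum ((PySem.Dict.getD (buildMap n nums) (nums.headD 0) PySem.Set.empty).foldl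
      (fun d comb => d.insert comb 1) (PySem.Dict.empty : PySem.Dict (Nat × Nat) Int)).items j
      = if j < pvS n then pvStepF n pvOnes (nums.headD 0) j else 0 := by
    intro j
    rw [hinit]
    unfold pvGsum
    rw [List.filter_map]
    rw [show ((fun p : (Nat × Nat) × Int => p.1.2 == j) ∘ (fun p : Nat × Nat => (p, (1 : Int))))
        = (fun p : Nat × Nat => p.2 == j) from rfl]
    rw [List.map_map]
    rw [show ((fun p : (Nat × Nat) × Int => p.2) ∘ (fun p : Nat × Nat => (p, (1 : Int))))
        = (fun _ : Nat × Nat => (1 : Int)) from rfl]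
    rw [hmr0, mrow_slice]
    by_cases h : j < pvS n
    · simp only [if_pos h]
      rw [List.map_map]
      unfold pvStepF pvOnes
      rfl
    · simp only [if_neg h]
      simp
  have hA := A_loop n nums (nums.drop 1)
    (fun r hr => List.mem_of_mem_drop hr)
    ((PySem.Dict.getD (buildMap n nums) (nums.headD 0) PySem.Set.empty).foldl
      (fun d comb => d.insert comb 1) PySem.Dict.empty)
    (pvStepF n pvOnes (nums.headD 0)) hb0 hinv0
  -- A's value
  have hAval : solution g
      = (((nums.drop 1).foldl (fun prevCount row =>
          prevCount.items.foldl (fun currCount pq =>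
            (PySem.Dict.getD (buildMap n nums) row PySem.Set.empty).foldl (fun currCount cc =>
              if pq.1.2 == cc.1 then PySem.Dict.modify currCount cc 0 (fun v => v + pq.2)
              else currCount) currCount) PySem.Dict.empty)
          ((PySem.Dict.getD (buildMap n nums) (nums.headD 0) PySem.Set.empty).foldl
            (fun d comb => d.insert comb 1) PySem.Dict.empty)).items.map (fun p => p.2)).sum := rfl
  rw [hAval, sum_values_eq (pvS n) _ hA.1, List.map_congr_left (fun j _ => hA.2 j)]
  have hdropif : (List.range (pvS n)).map (fun j =>
        if j < pvS n then ((nums.drop 1).foldl (pvStepF n) (pvStepF n pvOnes (nums.headD 0))) j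
        else 0)
      = (List.range (pvS n)).map
          ((nums.drop 1).foldl (pvStepF n) (pvStepF n pvOnes (nums.headD 0))) :=
    List.map_congr_left (fun j hj => if_pos (List.mem_range.mp hj))
  rw [hdropif]
  -- B's value
  have hBval : solution_alt g
      = ((nums.foldl (fun cnt num =>
          (List.range (pvS n)).map (fun j =>
            (((List.range (pvS n)).filter (fun i => qCombine i j n == num)).map
              (fun i => cnt.getD i 0)).sum)) (List.replicate (pvS n) (1 : Int)))).sum := rfl
  have hrepl : List.replicate (pvS n) (1 : Int) = (List.range (pvS n)).map pvOnes := by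
    rw [show pvOnes = (fun _ : Nat => (1 : Int)) from rfl, List.map_const', List.length_range]
  rw [hBval, hrepl, B_loop]
  have hfold : nums.foldl (pvStepF n) pvOnes
      = (nums.drop 1).foldl (pvStepF n) (pvStepF n pvOnes (nums.headD 0)) := by
    rw [hcons]
    rfl
  rw [hfold]
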